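-- pv_equiv track=rewrite | github.com/jasonj2333/Python_SPP | iepypm/Rozdzial 3/Przyklad_3.8/zad_b.py | zad_b
-- ===== SOURCE A (Python) =====
-- def zad_b(A, B, n, p):
--     C = [0 for row in range(n + 1)]
--     dalej = 0
--     for i in range(n, -1, -1):
--         pom = A[i] + B[i] + dalej
--         C[i] = pom % p
--         dalej = pom // p
--     return C
-- ===== SOURCE B (Python) =====
-- def zad_b(A, B, n, p):
--     total = 0
--     for i in range(n + 1):
--         total = total * p + A[i] + B[i]
--     digits = []
--     for _ in range(n + 1):
--         digits.append(total % p)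
--         total //= p
--     digits.reverse()
--     return digits
-- ===== Notes on version B (the rewrite author's own statement) =====
-- stated objective: alternative
-- what changed: B folds both digit arrays into a single integer with Horner's rule, then builds the result as a fresh list by repeatedly appending total % p and dividing, reversing at the end - no carry variable, no preallocated array, no indexed writes; the trade-off is big-integer arithmetic, slower than A for very long arrays.
import Mathlib
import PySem

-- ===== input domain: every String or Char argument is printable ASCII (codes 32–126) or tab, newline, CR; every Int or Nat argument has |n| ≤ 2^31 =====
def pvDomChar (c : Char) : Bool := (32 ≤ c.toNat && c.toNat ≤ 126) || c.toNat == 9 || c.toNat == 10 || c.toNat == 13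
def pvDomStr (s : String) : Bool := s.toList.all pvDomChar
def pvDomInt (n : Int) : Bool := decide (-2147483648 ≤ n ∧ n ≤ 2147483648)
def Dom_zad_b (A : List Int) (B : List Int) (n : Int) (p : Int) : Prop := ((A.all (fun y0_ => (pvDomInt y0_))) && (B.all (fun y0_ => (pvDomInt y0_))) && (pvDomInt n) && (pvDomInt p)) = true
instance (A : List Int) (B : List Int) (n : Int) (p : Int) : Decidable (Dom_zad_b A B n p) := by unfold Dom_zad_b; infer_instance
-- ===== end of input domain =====

-- B replaces A's schoolbook carry addition (indexed writes into a preallocated array) by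
-- folding both digit arrays into one integer (Horner) and re-extracting the base-p digits
-- by repeated floor divmod, appending least-significant-first and reversing (objective: alternative).

-- ===== PORT A =====
-- loop body of A: pom = A[i] + B[i] + dalej; C[i] = pom % p; dalej = pom // p
-- (indices i in range(n, -1, -1) are nonnegative and, under Pre_, in range, so pyGetD/pySetD are exact)
def zadbStepA (A : List Int) (B : List Int) (p : Int) (st : List Int × Int) (i : Int) : List Int × Int :=
  let pom := PySem.List.pyGetD A i 0 + PySem.List.pyGetD B i 0 + st.2
  (PySem.List.pySetD st.1 i (PySem.Int.mod pom p), PySem.Int.floordiv pom p)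

def zad_b (A : List Int) (B : List Int) (n : Int) (p : Int) : List Int :=
  ((PySem.List.pyRange n (-1) (-1)).foldl (zadbStepA A B p) (List.replicate (n + 1).toNat 0, 0)).1

-- ===== PORT B =====
-- loop body of B's second loop: digits.append(total % p); total //= p
def zadbStepB (p : Int) (st : List Int × Int) (_i : Int) : List Int × Int :=
  (st.1 ++ [PySem.Int.mod st.2 p], PySem.Int.floordiv st.2 p)

-- B's first loop: total = total * p + A[i] + B[i] over range(n + 1)
def zadbTotal (A : List Int) (B : List Int) (n : Int) (p : Int) : Int :=
  (PySem.List.pyRange 0 (n + 1) 1).foldl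
    (fun t i => t * p + PySem.List.pyGetD A i 0 + PySem.List.pyGetD B i 0) 0

def zad_b_alt (A : List Int) (B : List Int) (n : Int) (p : Int) : List Int :=
  ((PySem.List.pyRange 0 (n + 1) 1).foldl (zadbStepB p) ([], zadbTotal A B n p)).1.reverse

-- ===== PRECONDITION & SPEC =====
-- When the loop runs (0 ≤ n) Python A needs p ≠ 0 (else ZeroDivisionError) and indices 0..n
-- inside both lists (else IndexError); for n < 0 A returns [] with no access, so no condition.
def Pre_zad_b (A : List Int) (B : List Int) (n : Int) (p : Int) : Prop :=
  0 ≤ n → (p ≠ 0 ∧ n < (A.length : Int) ∧ n < (B.length : Int))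
instance (A : List Int) (B : List Int) (n : Int) (p : Int) : Decidable (Pre_zad_b A B n p) := by
  unfold Pre_zad_b; infer_instance

def pvWitness_zad_b : List Int × List Int × Int × Int := ([1, 2], [2, 3], 1, 10)

def Spec_zad_b (A : List Int) (B : List Int) (n : Int) (p : Int) (out : List Int) : Prop := out = zad_b_alt A B n p
instance (A : List Int) (B : List Int) (n : Int) (p : Int) (out : List Int) : Decidable (Spec_zad_b A B n p out) := by unfold Spec_zad_b; infer_instance

-- ===== CLAIM (what is proved, stated in full; the proofs are below) =====
def Claim_equal_zad_b : Prop := ∀ (A : List Int) (B : List Int) (n : Int) (p : Int), Dom_zad_b A B n p → Pre_zad_b A B n p → Spec_zad_b A B n p (zad_b A B n p)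

-- ===== LEMMAS AND PROOFS =====

-- Horner value of the first k digit pairs (exactly B's first loop).
def zadbHorner (A : List Int) (B : List Int) (p : Int) (k : Int) : Int :=
  (PySem.List.pyRange 0 k 1).foldl
    (fun t i => t * p + PySem.List.pyGetD A i 0 + PySem.List.pyGetD B i 0) 0

-- The k base-p digits of t, least significant first.
def zadbDigits (p : Int) (t : Int) : Nat → List Int
  | 0 => []
  | Nat.succ k => PySem.Int.mod t p :: zadbDigits p (PySem.Int.floordiv t p) k

-- proof-side mirror of A's write loop with the whole remaining integer as state
def zadbStepW (p : Int) (st : List Int × Int) (i : Int) : List Int × Int :=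
  (PySem.List.pySetD st.1 i (PySem.Int.mod st.2 p), PySem.Int.floordiv st.2 p)

lemma zadbHorner_succ (A B : List Int) (p : Int) (k : ℕ) :
    zadbHorner A B p ((k : Int) + 1)
      = zadbHorner A B p k * p + PySem.List.pyGetD A k 0 + PySem.List.pyGetD B k 0 := by
  unfold zadbHorner
  rw [PySem.List.pyRange_one_succ_right (by positivity), List.foldl_append]
  rfl

lemma zadb_mod_shift (h pom p : Int) :
    PySem.Int.mod (h * p + pom) p = PySem.Int.mod pom p := by
  simp [PySem.Int.mod]

lemma zadb_floordiv_shift (h pom p : Int) (hp : p ≠ 0) :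
    PySem.Int.floordiv (h * p + pom) p = h + PySem.Int.floordiv pom p := by
  simp [PySem.Int.floordiv]
  rw [add_comm, Int.add_mul_fdiv_right pom h hp, add_comm]

-- Invariant of A's downward loop: A carries 'dalej', the mirror carries the whole remaining
-- integer t, and t = Horner-prefix + dalej; then both write the same digits.
lemma zadb_loop_eq (A B : List Int) (p : Int) (hp : p ≠ 0) :
    ∀ (k : ℕ) (C : List Int) (d t : Int),
      t = zadbHorner A B p k + d →
      ((PySem.List.pyRange ((k : Int) - 1) (-1) (-1)).foldl (zadbStepA A B p) (C, d)).1
        = ((PySem.List.pyRange ((k : Int) - 1) (-1) (-1)).foldl (zadbStepW p) (C, t)).1 := by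
  intro k
  induction k with
  | zero =>
    intro C d t ht
    rw [PySem.List.pyRange_neg_one_eq_nil (by omega)]
    rfl
  | succ k ih =>
    intro C d t ht
    have hcons : ((k + 1 : ℕ) : Int) - 1 = (k : Int) := by push_cast; ring
    rw [hcons, PySem.List.pyRange_neg_one_cons (by omega), List.foldl_cons, List.foldl_cons]
    have hth : t = zadbHorner A B p k * p
        + (PySem.List.pyGetD A k 0 + PySem.List.pyGetD B k 0 + d) := by
      rw [ht, show ((k + 1 : ℕ) : Int) = (k : Int) + 1 by push_cast; ring, zadbHorner_succ]
      ring
    have hmod : PySem.Int.mod t p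
        = PySem.Int.mod (PySem.List.pyGetD A k 0 + PySem.List.pyGetD B k 0 + d) p := by
      rw [hth, zadb_mod_shift]
    have hdiv : PySem.Int.floordiv t p
        = zadbHorner A B p k
          + PySem.Int.floordiv (PySem.List.pyGetD A k 0 + PySem.List.pyGetD B k 0 + d) p := by
      rw [hth, zadb_floordiv_shift _ _ _ hp]
    show ((PySem.List.pyRange ((k : Int) - 1) (-1) (-1)).foldl (zadbStepA A B p)
            (zadbStepA A B p (C, d) k)).1
        = ((PySem.List.pyRange ((k : Int) - 1) (-1) (-1)).foldl (zadbStepW p)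
            (zadbStepW p (C, t) k)).1
    have hstep : zadbStepW p (C, t) k
        = ((zadbStepA A B p (C, d) k).1, zadbHorner A B p k + (zadbStepA A B p (C, d) k).2) := by
      simp [zadbStepA, zadbStepW, hmod, hdiv]
    rw [hstep]
    exact ih (zadbStepA A B p (C, d) k).1 (zadbStepA A B p (C, d) k).2 _ rfl

-- The mirror write loop over a length-k prefix produces the digits of t, most significant first.
lemma zadb_write_eq (p : Int) :
    ∀ (k : ℕ) (t : Int) (D E : List Int), D.length = k →
      ((PySem.List.pyRange ((k : Int) - 1) (-1) (-1)).foldl (zadbStepW p) (D ++ E, t)).1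
        = (zadbDigits p t k).reverse ++ E := by
  intro k
  induction k with
  | zero =>
    intro t D E hD
    rw [PySem.List.pyRange_neg_one_eq_nil (by omega)]
    simp [List.length_eq_zero_iff.mp hD, zadbDigits]
  | succ k ih =>
    intro t D E hD
    obtain ⟨D', x, rfl, hD'⟩ : ∃ D' x, D = D' ++ [x] ∧ D'.length = k := by
      rcases List.eq_nil_or_concat D with rfl | ⟨D', x, rfl⟩
      · simp at hD
      · exact ⟨D', x, by simp, by simpa using hD⟩
    have hcons : ((k + 1 : ℕ) : Int) - 1 = (k : Int) := by push_cast; ring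
    rw [hcons, PySem.List.pyRange_neg_one_cons (by omega), List.foldl_cons]
    have hset : zadbStepW p (D' ++ [x] ++ E, t) (k : Int)
        = (D' ++ (PySem.Int.mod t p :: E), PySem.Int.floordiv t p) := by
      simp [zadbStepW, PySem.List.pySetD_natCast, ← hD', List.set_append_right,
        List.append_assoc]
    rw [hset, ih _ D' (PySem.Int.mod t p :: E) hD']
    simp [zadbDigits]

-- B's second loop appends the digits of t, least significant first, one per range element.
lemma zadb_append_eq (p : Int) :
    ∀ (L : List Int) (C : List Int) (t : Int),
      (L.foldl (zadbStepB p) (C, t)).1 = C ++ zadbDigits p t L.length := by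
  intro L
  induction L with
  | nil => intro C t; simp [zadbDigits]
  | cons i L ih =>
    intro C t
    rw [List.foldl_cons, show zadbStepB p (C, t) i
        = (C ++ [PySem.Int.mod t p], PySem.Int.floordiv t p) from rfl, ih]
    simp [zadbDigits]

-- ===== VERDICT (by name: the statement is the Claim_ definition above) =====
theorem zad_b_spec : Claim_equal_zad_b := by
  intro A B n p _ hpre
  unfold Spec_zad_b
  by_cases hn : 0 ≤ n
  · obtain ⟨k, hk⟩ : ∃ k : ℕ, n = (k : Int) - 1 := ⟨(n + 1).toNat, by omega⟩
    subst hk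
    obtain ⟨hp, -, -⟩ := hpre hn
    unfold zad_b zad_b_alt
    have h1 : (k : Int) - 1 + 1 = (k : Int) := by ring
    rw [h1]
    rw [zadb_loop_eq A B p hp k _ 0 (zadbTotal A B ((k : Int) - 1) p)
      (by unfold zadbTotal zadbHorner; rw [h1]; ring)]
    have hrep : List.replicate ((k : Int)).toNat (0 : Int)
        = List.replicate ((k : Int)).toNat (0 : Int) ++ [] := by simp
    have hlen : (List.replicate ((k : Int)).toNat (0 : Int)).length = k := by
      simp
    have hw := zadb_write_eq p k (zadbTotal A B ((k : Int) - 1) p)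
      (List.replicate ((k : Int)).toNat 0) [] hlen
    rw [hrep, hw, zadb_append_eq p _ [] (zadbTotal A B ((k : Int) - 1) p)]
    simp [PySem.List.length_pyRange_one, zadbTotal, h1]
  · unfold zad_b zad_b_alt
    rw [PySem.List.pyRange_neg_one_eq_nil (by omega),
      PySem.List.pyRange_one_eq_nil (by omega)]
    simp
    omega
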